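-- pv_equiv track=rewrite | github.com/grapefruit623/leetcode | easy/28_implementstrStr.py | mystrStr
-- ===== SOURCE A (Python) =====
-- def mystrStr(haystack, needle):
--     if needle == "":
--         return 0
--
--     firstN = needle[0]
--     needleLen = len(needle)
--     needleRange = range(len(needle))
--
--     hayStackLen = len(haystack)
--     hayStackRange = range(len(haystack))
--     i = 0
--
--     stack = []
--
--     while i < hayStackLen:
--         if haystack[i] == needle[0]:
--             stack.append(i)
--         i += 1
--
--
--     for i in stack:
--         for j in needleRange:
--             if i+j > hayStackLen-1 or haystack[i+j] != needle[j]: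
--                 break
--         else:
--             return i
--
--     return -1
-- ===== SOURCE B (Python) =====
-- def mystrStr(haystack, needle):
--     return haystack.find(needle)
-- ===== Notes on version B (the rewrite author's own statement) =====
-- stated objective: idiomatic
-- what changed: B replaces A's two-pass collect-first-char-candidates-then-verify scan with a single call to str.find (CPython's linear two-way substring search).
import Mathlib
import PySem

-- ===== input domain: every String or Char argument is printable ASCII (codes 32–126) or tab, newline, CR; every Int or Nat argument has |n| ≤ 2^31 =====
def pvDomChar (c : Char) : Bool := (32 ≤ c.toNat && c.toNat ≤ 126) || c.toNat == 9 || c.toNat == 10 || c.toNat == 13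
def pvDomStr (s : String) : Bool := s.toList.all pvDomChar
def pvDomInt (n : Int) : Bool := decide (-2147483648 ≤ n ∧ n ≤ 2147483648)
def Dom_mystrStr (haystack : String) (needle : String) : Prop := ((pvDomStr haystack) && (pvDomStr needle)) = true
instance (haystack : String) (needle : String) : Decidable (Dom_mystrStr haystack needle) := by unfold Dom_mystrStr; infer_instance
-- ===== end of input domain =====

-- B replaces A's two-pass collect-candidates-then-verify scan with the idiomatic single call haystack.find(needle).

-- ===== PORT A =====
-- the while loop: collect every index i with haystack[i] == needle[0] into `stack`
def pvCollect (hs : List Char) (nd : List Char) (i : Nat) (stack : List Nat) : List Nat :=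
  if _h : i < hs.length then
    pvCollect hs nd (i + 1) (if hs[i]? = nd[0]? then stack ++ [i] else stack)
  else stack
termination_by hs.length - i

-- the inner for-else over j in needleRange: true = ran to completion (full match), false = break
def pvInnerGo (hs : List Char) (nd : List Char) (i : Nat) : List Nat → Bool
  | [] => true
  | j :: rest =>
    if ((i + j : Int) > (hs.length : Int) - 1) || !(hs[i + j]? = nd[j]? : Bool) then false
    else pvInnerGo hs nd i rest

-- the outer for over the collected candidates: return the first full match, else -1
def pvOuter (hs : List Char) (nd : List Char) : List Nat → Int
  | [] => -1
  | i :: rest => if pvInnerGo hs nd i (List.range nd.length) then (i : Int) else pvOuter hs nd rest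

def mystrStr (haystack : String) (needle : String) : Int :=
  if needle = "" then 0
  else
    let hs := haystack.toList
    let nd := needle.toList
    pvOuter hs nd (pvCollect hs nd 0 [])

-- ===== PORT B =====
def mystrStr_alt (haystack : String) (needle : String) : Int :=
  PySem.Str.find haystack needle

-- ===== PRECONDITION & SPEC =====
def Spec_mystrStr (haystack : String) (needle : String) (out : Int) : Prop := out = mystrStr_alt haystack needle
instance (haystack : String) (needle : String) (out : Int) : Decidable (Spec_mystrStr haystack needle out) := by unfold Spec_mystrStr; infer_instance

-- ===== CLAIM (what is proved, stated in full; the proofs are below) =====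
def Claim_equal_mystrStr : Prop := ∀ (haystack : String) (needle : String), Dom_mystrStr haystack needle → Spec_mystrStr haystack needle (mystrStr haystack needle)

-- ===== LEMMAS AND PROOFS =====

-- full-match test P for candidate index i
def pvP (hs nd : List Char) (i : Nat) : Bool := pvInnerGo hs nd i (List.range nd.length)

theorem pvInnerGo_eq_all (hs nd : List Char) (i : Nat) (js : List Nat) :
    pvInnerGo hs nd i js =
      js.all (fun j => !(((i + j : Int) > (hs.length : Int) - 1) || !(hs[i + j]? = nd[j]? : Bool))) := by
  induction js with
  | nil => rfl
  | cons j rest ih => by_cases h : ((i + j : Int) > (hs.length : Int) - 1) || !(hs[i + j]? = nd[j]? : Bool) <;>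
      simp [pvInnerGo, ih]

theorem pvP_iff (hs nd : List Char) (i : Nat) :
    pvP hs nd i = true ↔ ∀ j < nd.length, hs[i + j]? = nd[j]? := by
  rw [pvP, pvInnerGo_eq_all, List.all_eq_true]
  constructor
  · intro h j hj
    have := h j (List.mem_range.mpr hj)
    simp only [Bool.not_or, Bool.and_eq_true, Bool.not_eq_true'] at this
    simpa using this.2
  · intro h j hj
    have hj' := List.mem_range.mp hj
    have heq := h j hj'
    have hnd : nd[j]? = some nd[j] := List.getElem?_eq_getElem hj'
    have hlt : i + j < hs.length := by
      have hsome : hs[i + j]?.isSome := by rw [heq, hnd]; rfl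
      simpa using hsome
    simp only [Bool.not_or, Bool.and_eq_true, Bool.not_eq_true', decide_eq_false_iff_not]
    constructor
    · omega
    · simpa using heq

theorem prefix_drop_iff (hs nd : List Char) (i : Nat) :
    nd <+: hs.drop i ↔ ∀ j < nd.length, hs[i + j]? = nd[j]? := by
  constructor
  · intro h j hj
    have hg : (hs.drop i)[j]? = nd[j]? := by
      obtain ⟨t, ht⟩ := h
      rw [← ht, List.getElem?_append_left hj]
    rw [← hg, List.getElem?_drop]
  · intro h
    by_cases hnd : nd = []
    · simp [hnd]
    · have hlen : i + nd.length ≤ hs.length := by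
        have hpos : 0 < nd.length := List.length_pos_iff.mpr hnd
        have heq := h (nd.length - 1) (by omega)
        have hsome : hs[i + (nd.length - 1)]?.isSome := by
          rw [heq]; rw [List.getElem?_eq_getElem (by omega)]; rfl
        simp at hsome
        omega
      rw [List.prefix_iff_eq_take]
      apply List.ext_getElem?
      intro j
      by_cases hj : j < nd.length
      · rw [List.getElem?_take_of_lt hj, List.getElem?_drop, h j hj]
      · have h1 : nd[j]? = none := List.getElem?_eq_none (by omega)
        have h2 : ((hs.drop i).take nd.length)[j]? = none := by
          apply List.getElem?_eq_none
          simp only [List.length_take, List.length_drop]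
          omega
        rw [h1, h2]

theorem pvP_iff_prefix (hs nd : List Char) (i : Nat) :
    pvP hs nd i = true ↔ nd <+: hs.drop i := by
  rw [pvP_iff, prefix_drop_iff]

theorem pvOuter_eq_find? (hs nd : List Char) (l : List Nat) :
    pvOuter hs nd l = (l.find? (pvP hs nd)).elim (-1) (fun i => (i : Int)) := by
  induction l with
  | nil => rfl
  | cons i rest ih =>
    simp only [pvOuter]
    by_cases h : pvP hs nd i = true
    · rw [if_pos (show pvInnerGo hs nd i (List.range nd.length) = true from h),
        List.find?_cons_of_pos h]
      rfl
    · rw [if_neg (show ¬ pvInnerGo hs nd i (List.range nd.length) = true from h),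
        List.find?_cons_of_neg h, ih]

theorem pvCollect_eq (hs nd : List Char) (i : Nat) (stack : List Nat) :
    pvCollect hs nd i stack =
      stack ++ (List.range' i (hs.length - i)).filter (fun k => decide (hs[k]? = nd[0]?)) := by
  by_cases h : i < hs.length
  · rw [pvCollect, dif_pos h, pvCollect_eq hs nd (i + 1)]
    have hr : hs.length - i = (hs.length - (i + 1)) + 1 := by omega
    rw [hr, List.range'_succ, List.filter_cons]
    by_cases hc : hs[i]? = nd[0]?
    · rw [if_pos hc, if_pos (by simpa using hc)]
      simp
    · rw [if_neg hc, if_neg (by simpa using hc)]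
  · rw [pvCollect, dif_neg h]
    have h0 : hs.length - i = 0 := by omega
    rw [h0]
    simp
termination_by hs.length - i

theorem find?_filter_weaken {l : List Nat} {p q : Nat → Bool} (h : ∀ x, p x = true → q x = true) :
    (l.filter q).find? p = l.find? p := by
  induction l with
  | nil => rfl
  | cons a rest ih =>
    by_cases hp : p a = true
    · rw [List.filter_cons, if_pos (h a hp), List.find?_cons_of_pos hp, List.find?_cons_of_pos hp]
    · rw [List.find?_cons_of_neg hp, ← ih, List.filter_cons]
      by_cases hq : q a = true
      · rw [if_pos hq, List.find?_cons_of_neg hp]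
      · rw [if_neg hq]

theorem find?_range_eq_some {P : Nat → Bool} {n m : Nat} (hm : m < n) (hP : P m = true)
    (hmin : ∀ k < m, P k = false) : (List.range n).find? P = some m := by
  induction n with
  | zero => omega
  | succ n ih =>
    rcases Nat.lt_succ_iff_lt_or_eq.mp hm with h1 | h2
    · rw [List.range_succ, List.find?_append, ih h1]
      rfl
    · subst h2
      rw [List.range_succ, List.find?_append]
      have hnone : (List.range m).find? P = none := by
        rw [List.find?_eq_none]
        intro x hx
        simp [hmin x (List.mem_range.mp hx)]
      rw [hnone]
      simp [hP]

theorem find?_range_eq_none {P : Nat → Bool} {n : Nat} (h : ∀ k, P k = false) :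
    (List.range n).find? P = none := by
  rw [List.find?_eq_none]; intro x _; simp [h x]

-- main characterisation: A's value on a nonempty needle is Chars.find
theorem mystrStr_core (hs nd : List Char) (hnd : nd ≠ []) :
    pvOuter hs nd (pvCollect hs nd 0 []) = PySem.Chars.find hs nd := by
  rw [pvCollect_eq, pvOuter_eq_find?]
  simp only [Nat.sub_zero, List.nil_append, ← List.range_eq_range']
  rw [find?_filter_weaken (q := fun k => decide (hs[k]? = nd[0]?)) (fun k hk => by
    have h0 : hs[k + 0]? = nd[0]? := (pvP_iff hs nd k).mp hk 0 (List.length_pos_iff.mpr hnd)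
    simp only [Nat.add_zero] at h0
    simp [h0])]
  rcases (lt_or_eq_of_le (PySem.Chars.neg_one_le_find hs nd)).symm with hfind | hfind
  · -- find = -1 : no occurrence anywhere
    have hninf : ¬ nd <:+: hs := (PySem.Chars.find_eq_neg_one_iff hs nd).mp hfind.symm
    have hnop : ∀ k, pvP hs nd k = false := by
      intro k
      by_contra hc
      simp only [Bool.not_eq_false] at hc
      have hpre := (pvP_iff_prefix hs nd k).mp hc
      have hin : PySem.Chars.isIn nd hs = true :=
        (PySem.Chars.exists_prefix_drop_iff_isIn nd hs).mp ⟨k, hpre⟩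
      exact hninf ((PySem.Chars.isIn_iff_infix nd hs).mp hin)
    rw [find?_range_eq_none hnop, ← hfind]
    rfl
  · -- find ≥ 0 : it is exactly the first full-match index
    have hge : 0 ≤ PySem.Chars.find hs nd := by omega
    obtain ⟨hpre, hmin⟩ := PySem.Chars.find_spec hge
    set m := (PySem.Chars.find hs nd).toNat with hm
    have hmlt : m < hs.length := by
      have hle := PySem.Chars.find_le_length hs nd
      have hle' : m ≤ hs.length := by omega
      rcases lt_or_eq_of_le hle' with h | h
      · exact h
      · exfalso
        rw [h, List.drop_length] at hpre
        exact hnd (List.prefix_nil.mp hpre)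
    rw [find?_range_eq_some hmlt ((pvP_iff_prefix hs nd m).mpr hpre)
      (fun k hk => by
        have hnk := hmin k hk
        rw [← Bool.not_eq_true]
        intro hc
        exact hnk ((pvP_iff_prefix hs nd k).mp hc))]
    simp [Option.elim, hm, Int.toNat_of_nonneg hge]

-- ===== VERDICT (by name: the statement is the Claim_ definition above) =====
theorem mystrStr_spec : Claim_equal_mystrStr := by
  intro haystack needle _
  unfold Spec_mystrStr mystrStr mystrStr_alt
  by_cases h : needle = ""
  · subst h
    simp [PySem.Str.find, PySem.Chars.find_nil]
  · simp only [h, if_false]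
    have hnd : needle.toList ≠ [] := fun hc => h (String.toList_eq_nil_iff.mp hc)
    rw [mystrStr_core _ _ hnd]
    simp [PySem.Str.find]
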